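-- pv_equiv track=rewrite | github.com/roctbb/ai-game-engine | backend/tests/test_new_student_games.py | _blinking_bridge_reachable_with_few_bridges
-- ===== SOURCE A (Python) =====
-- def _blinking_bridge_reachable_with_few_bridges(board: list[list[int]], max_bridge_steps: int) -> bool:
--     queue = [((1, 1), 0)]
--     seen = {((1, 1), 0)}
--     head = 0
--     while head < len(queue):
--         (x, y), bridge_steps = queue[head]
--         head += 1
--         if board[x][y] == 1:
--             return True
--         for dx, dy in ((0, -1), (1, 0), (0, 1), (-1, 0)):
--             nx = x + dx
--             ny = y + dy
--             if nx < 0 or nx >= len(board) or ny < 0 or ny >= len(board[nx]):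
--                 continue
--             cell = board[nx][ny]
--             if cell == -1:
--                 continue
--             next_bridge_steps = bridge_steps + (1 if cell in (-2, 2) else 0)
--             if next_bridge_steps > max_bridge_steps:
--                 continue
--             state = ((nx, ny), next_bridge_steps)
--             if state in seen:
--                 continue
--             seen.add(state)
--             queue.append(state)
--     return False
-- ===== SOURCE B (Python) =====
-- def _blinking_bridge_reachable_with_few_bridges(board: list[list[int]], max_bridge_steps: int) -> bool:
--     # Layered 0-1 BFS: find the minimum number of bridge cells that must be
--     # entered to reach a target cell (value 1), then compare it to the budget.
--     visited = {(1, 1)}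
--     stack = [(1, 1)]
--
--     def close_free():
--         # close `visited` under moves into cells that are neither walls nor bridges
--         while stack:
--             x, y = stack.pop()
--             for dx, dy in ((0, -1), (1, 0), (0, 1), (-1, 0)):
--                 nx, ny = x + dx, y + dy
--                 if 0 <= nx < len(board) and 0 <= ny < len(board[nx]):
--                     v = board[nx][ny]
--                     if v != -1 and v != -2 and v != 2 and (nx, ny) not in visited:
--                         visited.add((nx, ny))
--                         stack.append((nx, ny))
--
--     close_free()
--     bridges = 0
--     while not any(board[x][y] == 1 for (x, y) in visited):
--         # cross one more bridge cell: admit every unvisited bridge cell adjacent to `visited`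
--         frontier = [(x + dx, y + dy)
--                     for (x, y) in visited
--                     for dx, dy in ((0, -1), (1, 0), (0, 1), (-1, 0))
--                     if 0 <= x + dx < len(board) and 0 <= y + dy < len(board[x + dx])
--                     and board[x + dx][y + dy] in (-2, 2)
--                     and (x + dx, y + dy) not in visited]
--         if not frontier:
--             return False
--         bridges += 1
--         for c in frontier:
--             visited.add(c)
--             stack.append(c)
--         close_free()
--     return bridges <= max_bridge_steps
-- ===== Notes on version B (the rewrite author's own statement) =====
-- stated objective: alternative
-- what changed: A runs BFS over (cell, bridge_count) states capped by the budget; B runs a layered 0-1 BFS over cells only, computing the minimum number of bridge cells needed to reach a target and comparing it to the budget once at the end; Pre_ additionally excludes the corner of a negative budget with the target already on the start cell, where A answers True (the start is the target) and B answers False (a negative budget admits nothing) - both defensible on that unspecified corner.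
-- outside the precondition, e.g. on _blinking_bridge_reachable_with_few_bridges([[0, 0], [0, 1]], -1): A returns True, B returns False
import Mathlib
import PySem

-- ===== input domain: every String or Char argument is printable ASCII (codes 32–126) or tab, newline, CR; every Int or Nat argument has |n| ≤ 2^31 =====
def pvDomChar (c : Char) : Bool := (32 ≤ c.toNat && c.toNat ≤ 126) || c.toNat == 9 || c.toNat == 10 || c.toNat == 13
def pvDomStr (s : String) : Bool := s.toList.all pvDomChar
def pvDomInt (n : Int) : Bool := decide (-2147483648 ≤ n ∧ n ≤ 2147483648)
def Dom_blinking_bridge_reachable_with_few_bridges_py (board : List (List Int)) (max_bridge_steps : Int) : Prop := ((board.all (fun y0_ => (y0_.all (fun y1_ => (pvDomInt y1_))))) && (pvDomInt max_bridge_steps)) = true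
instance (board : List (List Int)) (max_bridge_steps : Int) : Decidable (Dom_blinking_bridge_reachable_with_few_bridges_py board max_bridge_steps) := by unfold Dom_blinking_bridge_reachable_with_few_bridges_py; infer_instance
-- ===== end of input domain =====

-- B replaces A's BFS over (cell, bridge_count) states by a layered 0-1 BFS over cells that
-- computes the minimum number of bridge cells needed to reach a target and compares it to the
-- budget at the end, so the search no longer depends on max_bridge_steps (alternative algorithm).

-- ===== PORT A =====
-- board[x][y] read via PySem (only evaluated at indices the Python code has bounds-checked,
-- plus the start (1, 1), which Pre_ keeps in range).
def pvVal (board : List (List Int)) (x y : Int) : Int :=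
  PySem.List.pyGetD (PySem.List.pyGetD board x []) y 0

def pvRowLen (board : List (List Int)) (x : Int) : Int :=
  PySem.List.len (PySem.List.pyGetD board x [])

def pvDirs : List (Int × Int) := [(0, -1), (1, 0), (0, 1), (-1, 0)]

-- one iteration of A's inner `for dx, dy in …` loop, acting on (seen, newly queued)
def pvAStep (board : List (List Int)) (max_bridge_steps x y bs : Int)
    (p : PySem.Set ((Int × Int) × Int) × List ((Int × Int) × Int)) (d : Int × Int) :
    PySem.Set ((Int × Int) × Int) × List ((Int × Int) × Int) :=
  let nx := x + d.1
  let ny := y + d.2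
  if nx < 0 ∨ PySem.List.len board ≤ nx ∨ ny < 0 ∨ pvRowLen board nx ≤ ny then p
  else
    let cell := pvVal board nx ny
    if cell = -1 then p
    else
      let nbs := bs + (if cell = -2 ∨ cell = 2 then 1 else 0)
      if max_bridge_steps < nbs then p
      else
        let st := ((nx, ny), nbs)
        if PySem.Set.contains p.1 st then p
        else (PySem.Set.add p.1 st, p.2 ++ [st])

-- A's `while head < len(queue)` loop; `pending` is the unprocessed suffix queue[head:].
-- The fuel argument only makes the loop structural: it provably exceeds the iteration count.
def pvALoop (board : List (List Int)) (max_bridge_steps : Int) :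
    Nat → List ((Int × Int) × Int) → PySem.Set ((Int × Int) × Int) → Bool
  | 0, _, _ => false
  | _ + 1, [], _ => false
  | f + 1, ((x, y), bs) :: rest, seen =>
    if pvVal board x y = 1 then true
    else
      let p := pvDirs.foldl (pvAStep board max_bridge_steps x y bs) (seen, [])
      pvALoop board max_bridge_steps f (rest ++ p.2) p.1

def pvMaxRow (board : List (List Int)) : Nat :=
  (board.map List.length).foldr Nat.max 0

def pvAFuel (board : List (List Int)) (max_bridge_steps : Int) : Nat :=
  (board.length + 2) * (pvMaxRow board + 2) * (max_bridge_steps.toNat + 2) + 2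

def blinking_bridge_reachable_with_few_bridges_py
    (board : List (List Int)) (max_bridge_steps : Int) : Bool :=
  pvALoop board max_bridge_steps (pvAFuel board max_bridge_steps)
    [((1, 1), 0)] (PySem.Set.ofList [((1, 1), 0)])

-- ===== PORT B =====
-- Python stacks are lists popped at the END; the ports keep the stack reversed
-- (Python's last element = Lean's head), so push = cons and pop = head pattern match.

-- one iteration of close_free()'s inner `for dx, dy in …` loop, acting on (visited, stack)
def pvBStep (board : List (List Int)) (x y : Int)
    (p : PySem.Set (Int × Int) × List (Int × Int)) (d : Int × Int) :
    PySem.Set (Int × Int) × List (Int × Int) :=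
  let nx := x + d.1
  let ny := y + d.2
  if 0 ≤ nx ∧ nx < PySem.List.len board ∧ 0 ≤ ny ∧ ny < pvRowLen board nx then
    let v := pvVal board nx ny
    if v ≠ -1 ∧ v ≠ -2 ∧ v ≠ 2 ∧ ¬ PySem.Set.contains p.1 (nx, ny) then
      (PySem.Set.add p.1 (nx, ny), (nx, ny) :: p.2)
    else p
  else p

-- close_free(): close `visited` under cost-free moves (fuel only makes the loop structural)
def pvBExpand (board : List (List Int)) :
    Nat → List (Int × Int) → PySem.Set (Int × Int) → PySem.Set (Int × Int)
  | 0, _, visited => visited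
  | _ + 1, [], visited => visited
  | f + 1, (x, y) :: stack, visited =>
    let p := pvDirs.foldl (pvBStep board x y) (visited, stack)
    pvBExpand board f p.2 p.1

-- the `frontier = [...]` comprehension (bridge cells adjacent to visited, not yet visited)
def pvFrontier (board : List (List Int)) (visited : PySem.Set (Int × Int)) :
    List (Int × Int) :=
  visited.flatMap fun c =>
    pvDirs.filterMap fun d =>
      let nx := c.1 + d.1
      let ny := c.2 + d.2
      if 0 ≤ nx ∧ nx < PySem.List.len board ∧ 0 ≤ ny ∧ ny < pvRowLen board nx
          ∧ (pvVal board nx ny = -2 ∨ pvVal board nx ny = 2)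
          ∧ ¬ PySem.Set.contains visited (nx, ny) then
        some (nx, ny)
      else none

def pvCellFuel (board : List (List Int)) : Nat :=
  (board.length + 2) * (pvMaxRow board + 2) + 2

-- the `while not any(board[x][y] == 1 …)` loop, carrying the bridge-level counter
def pvBOuter (board : List (List Int)) (max_bridge_steps : Int) :
    Nat → Int → PySem.Set (Int × Int) → Bool
  | 0, _, _ => false
  | f + 1, bridges, visited =>
    if visited.any (fun c => decide (pvVal board c.1 c.2 = 1)) then
      decide (bridges ≤ max_bridge_steps)
    else
      let frontier := pvFrontier board visited
      if frontier.isEmpty then false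
      else
        pvBOuter board max_bridge_steps f (bridges + 1)
          (pvBExpand board (frontier.length + pvCellFuel board) frontier.reverse
            (PySem.Set.update visited frontier))

def blinking_bridge_reachable_with_few_bridges_py_alt
    (board : List (List Int)) (max_bridge_steps : Int) : Bool :=
  pvBOuter board max_bridge_steps (pvCellFuel board) 0
    (pvBExpand board (1 + pvCellFuel board) [(1, 1)] (PySem.Set.ofList [(1, 1)]))

-- ===== PRECONDITION & SPEC =====
-- Pre_ excludes (a) the boards on which the Python A raises IndexError reading the start cell
-- board[1][1] (fewer than two rows, or row 1 shorter than two cells), and (b) the corner of a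
-- negative bridge budget with the target value 1 already on the start cell, where A answers
-- True (the start is the target) and B answers False (a negative budget admits no cell at
-- all): both values are defensible on that unspecified corner, so it lies outside the claim.
def Pre_blinking_bridge_reachable_with_few_bridges_py
    (board : List (List Int)) (max_bridge_steps : Int) : Prop :=
  2 ≤ board.length ∧ 2 ≤ (board.getD 1 []).length ∧
    (0 ≤ max_bridge_steps ∨ (board.getD 1 []).getD 1 0 ≠ 1)

instance (board : List (List Int)) (max_bridge_steps : Int) :
    Decidable (Pre_blinking_bridge_reachable_with_few_bridges_py board max_bridge_steps) := by
  unfold Pre_blinking_bridge_reachable_with_few_bridges_py; infer_instance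

def pvWitness_blinking_bridge_reachable_with_few_bridges_py : List (List Int) × Int :=
  ([[0, 0], [0, 1]], 0)

def Spec_blinking_bridge_reachable_with_few_bridges_py
    (board : List (List Int)) (max_bridge_steps : Int) (out : Bool) : Prop :=
  out = blinking_bridge_reachable_with_few_bridges_py_alt board max_bridge_steps

instance (board : List (List Int)) (max_bridge_steps : Int) (out : Bool) :
    Decidable (Spec_blinking_bridge_reachable_with_few_bridges_py board max_bridge_steps out) := by
  unfold Spec_blinking_bridge_reachable_with_few_bridges_py; infer_instance

-- ===== CLAIM (what is proved, stated in full; the proofs are below) =====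
def Claim_equal_blinking_bridge_reachable_with_few_bridges_py : Prop :=
  ∀ (board : List (List Int)) (max_bridge_steps : Int),
    Dom_blinking_bridge_reachable_with_few_bridges_py board max_bridge_steps →
    Pre_blinking_bridge_reachable_with_few_bridges_py board max_bridge_steps →
    Spec_blinking_bridge_reachable_with_few_bridges_py board max_bridge_steps
      (blinking_bridge_reachable_with_few_bridges_py board max_bridge_steps)

-- ===== LEMMAS AND PROOFS =====

-- reachability from a list of start nodes along a successor function
inductive pvReachFrom {α : Type} (succs : α → List α) : List α → α → Prop
  | base {init : List α} {x : α} : x ∈ init → pvReachFrom succs init x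
  | step {init : List α} {x y : α} :
      pvReachFrom succs init x → y ∈ succs x → pvReachFrom succs init y

theorem pvReach_mono {α : Type} {succs : α → List α} {i1 i2 : List α}
    (h : ∀ x ∈ i1, pvReachFrom succs i2 x) {z : α}
    (hz : pvReachFrom succs i1 z) : pvReachFrom succs i2 z := by
  induction hz with
  | base hx => exact h _ hx
  | step _ hy ih => exact pvReachFrom.step ih hy

theorem pvReach_closed {α : Type} {succs : α → List α} {init : List α}
    (hc : ∀ x ∈ init, ∀ y ∈ succs x, y ∈ init) {z : α}
    (hz : pvReachFrom succs init z) : z ∈ init := by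
  induction hz with
  | base hx => exact hx
  | step _ hy ih => exact hc _ ih _ hy

-- A's successor candidates (same guards as pvAStep, without the `seen` filter)
def pvCandA (board : List (List Int)) (max_bridge_steps : Int)
    (st : (Int × Int) × Int) (d : Int × Int) : Option ((Int × Int) × Int) :=
  let nx := st.1.1 + d.1
  let ny := st.1.2 + d.2
  if nx < 0 ∨ PySem.List.len board ≤ nx ∨ ny < 0 ∨ pvRowLen board nx ≤ ny then none
  else
    let cell := pvVal board nx ny
    if cell = -1 then none
    else
      let nbs := st.2 + (if cell = -2 ∨ cell = 2 then 1 else 0)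
      if max_bridge_steps < nbs then none
      else some ((nx, ny), nbs)

def pvSuccsA (board : List (List Int)) (max_bridge_steps : Int)
    (st : (Int × Int) × Int) : List ((Int × Int) × Int) :=
  pvDirs.filterMap (pvCandA board max_bridge_steps st)

-- B's cost-free successor candidates
def pvCandZ (board : List (List Int)) (c : Int × Int) (d : Int × Int) :
    Option (Int × Int) :=
  let nx := c.1 + d.1
  let ny := c.2 + d.2
  if (0 ≤ nx ∧ nx < PySem.List.len board ∧ 0 ≤ ny ∧ ny < pvRowLen board nx)
      ∧ pvVal board nx ny ≠ -1 ∧ pvVal board nx ny ≠ -2 ∧ pvVal board nx ny ≠ 2 then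
    some (nx, ny)
  else none

def pvZSuccs (board : List (List Int)) (c : Int × Int) : List (Int × Int) :=
  pvDirs.filterMap (pvCandZ board c)

-- one passable step of the maze (any cost)
def pvAdjB (board : List (List Int)) (c c' : Int × Int) : Prop :=
  (∃ d ∈ pvDirs, c' = (c.1 + d.1, c.2 + d.2)) ∧
    0 ≤ c'.1 ∧ c'.1 < PySem.List.len board ∧ 0 ≤ c'.2 ∧ c'.2 < pvRowLen board c'.1 ∧
    pvVal board c'.1 c'.2 ≠ -1

def pvCost (board : List (List Int)) (c : Int × Int) : Int :=
  if pvVal board c.1 c.2 = -2 ∨ pvVal board c.1 c.2 = 2 then 1 else 0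

-- "cell c is reachable entering bridge cells exactly k times" (no budget cap)
inductive pvR (board : List (List Int)) : Int × Int → Int → Prop
  | base : pvR board (1, 1) 0
  | step {c : Int × Int} {k : Int} {c' : Int × Int} :
      pvR board c k → pvAdjB board c c' → pvR board c' (k + pvCost board c')

theorem pvCost_nonneg (board : List (List Int)) (c : Int × Int) : 0 ≤ pvCost board c := by
  unfold pvCost; split <;> omega

theorem pvR_nonneg {board : List (List Int)} {c : Int × Int} {k : Int}
    (h : pvR board c k) : 0 ≤ k := by
  induction h with
  | base => omega
  | @step c k c' _ _ ih => have := pvCost_nonneg board c'; omega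

theorem pvR_step_bridge {board : List (List Int)} {a c' : Int × Int} {k : Int}
    (hR : pvR board a k) (hadj : pvAdjB board a c')
    (hbr : pvVal board c'.1 c'.2 = -2 ∨ pvVal board c'.1 c'.2 = 2) :
    pvR board c' (k + 1) := by
  have hc1 : pvCost board c' = 1 := by
    unfold pvCost
    rw [if_pos hbr]
  have := pvR.step hR hadj
  rwa [hc1] at this

theorem pvR_step_free {board : List (List Int)} {a c' : Int × Int} {k : Int}
    (hR : pvR board a k) (hadj : pvAdjB board a c')
    (h2 : pvVal board c'.1 c'.2 ≠ -2) (h3 : pvVal board c'.1 c'.2 ≠ 2) :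
    pvR board c' k := by
  have hc0 : pvCost board c' = 0 := by
    unfold pvCost
    rw [if_neg]
    rintro (h | h) <;> [exact h2 h; exact h3 h]
  have := pvR.step hR hadj
  rwa [hc0, add_zero] at this

theorem pvCandA_eq_some {board : List (List Int)} {m : Int}
    {st st' : (Int × Int) × Int} {d : Int × Int} (hd : d ∈ pvDirs) :
    pvCandA board m st d = some st' ↔
      st'.1 = (st.1.1 + d.1, st.1.2 + d.2) ∧ pvAdjB board st.1 st'.1 ∧
        st'.2 = st.2 + pvCost board st'.1 ∧ st'.2 ≤ m := by
  unfold pvCandA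
  dsimp only
  rw [show (if pvVal board (st.1.1 + d.1) (st.1.2 + d.2) = -2 ∨
        pvVal board (st.1.1 + d.1) (st.1.2 + d.2) = 2 then (1 : Int) else 0) =
      pvCost board (st.1.1 + d.1, st.1.2 + d.2) from rfl]
  split_ifs with h1 h2 h3
  · simp only [reduceCtorEq, false_iff]
    rintro ⟨hfst, ⟨-, hb1, hb2, hb3, hb4, -⟩, -, -⟩
    rw [hfst] at hb1 hb2 hb3 hb4
    simp only at hb1 hb2 hb3 hb4
    rcases h1 with h | h | h | h <;> [omega; exact absurd hb2 (by omega); omega; exact absurd hb4 (by omega)]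
  · simp only [reduceCtorEq, false_iff]
    rintro ⟨hfst, ⟨-, -, -, -, -, hv⟩, -, -⟩
    rw [hfst] at hv
    exact hv h2
  · simp only [reduceCtorEq, false_iff]
    rintro ⟨hfst, -, hk, hle⟩
    rw [hfst] at hk
    rw [hk] at hle
    exact absurd hle (not_le.mpr h3)
  · push_neg at h1
    obtain ⟨hb1, hb2, hb3, hb4⟩ := h1
    constructor
    · rintro h
      injection h with h
      subst h
      exact ⟨rfl, ⟨⟨d, hd, rfl⟩, by simpa using hb1, by simpa using hb2,
        by simpa using hb3, by simpa using hb4, h2⟩, rfl, not_lt.mp h3⟩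
    · rintro ⟨hfst, -, hk, -⟩
      have h2' : st.2 + pvCost board (st.1.1 + d.1, st.1.2 + d.2) = st'.2 := by
        rw [hk, hfst]
      exact congrArg some (Prod.ext hfst.symm h2')

theorem pv_mem_succsA {board : List (List Int)} {m : Int} {st st' : (Int × Int) × Int} :
    st' ∈ pvSuccsA board m st ↔
      pvAdjB board st.1 st'.1 ∧ st'.2 = st.2 + pvCost board st'.1 ∧ st'.2 ≤ m := by
  unfold pvSuccsA
  rw [List.mem_filterMap]
  constructor
  · rintro ⟨d, hd, hc⟩
    exact ((pvCandA_eq_some hd).mp hc).2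
  · rintro ⟨hadj, hk, hle⟩
    obtain ⟨d, hd, hfst⟩ := hadj.1
    exact ⟨d, hd, (pvCandA_eq_some hd).mpr ⟨hfst, hadj, hk, hle⟩⟩

theorem pvCandZ_eq_some {board : List (List Int)} {c c' : Int × Int} {d : Int × Int}
    (hd : d ∈ pvDirs) :
    pvCandZ board c d = some c' ↔
      c' = (c.1 + d.1, c.2 + d.2) ∧ pvAdjB board c c' ∧
        pvVal board c'.1 c'.2 ≠ -2 ∧ pvVal board c'.1 c'.2 ≠ 2 := by
  unfold pvCandZ
  dsimp only
  split_ifs with h1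
  · obtain ⟨⟨hb1, hb2, hb3, hb4⟩, hv1, hv2, hv3⟩ := h1
    constructor
    · rintro h
      injection h with h
      subst h
      exact ⟨rfl, ⟨⟨d, hd, rfl⟩, hb1, by simpa [PySem.List.len_eq] using hb2, hb3, hb4, hv1⟩, hv2, hv3⟩
    · rintro ⟨hfst, -, -, -⟩
      rw [hfst]
  · simp only [reduceCtorEq, false_iff]
    rintro ⟨hfst, ⟨-, hb1, hb2, hb3, hb4, hv1⟩, hv2, hv3⟩
    rw [hfst] at hb1 hb2 hb3 hb4 hv1 hv2 hv3
    simp only at hb1 hb2 hb3 hb4 hv1 hv2 hv3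
    exact h1 ⟨⟨hb1, by simpa [PySem.List.len_eq] using hb2, hb3, hb4⟩, hv1, hv2, hv3⟩

theorem pv_mem_zsuccs {board : List (List Int)} {c c' : Int × Int} :
    c' ∈ pvZSuccs board c ↔
      pvAdjB board c c' ∧ pvVal board c'.1 c'.2 ≠ -2 ∧ pvVal board c'.1 c'.2 ≠ 2 := by
  unfold pvZSuccs
  rw [List.mem_filterMap]
  constructor
  · rintro ⟨d, hd, hc⟩
    exact ((pvCandZ_eq_some hd).mp hc).2
  · rintro ⟨hadj, hv2, hv3⟩
    obtain ⟨d, hd, hfst⟩ := hadj.1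
    exact ⟨d, hd, (pvCandZ_eq_some hd).mpr ⟨hfst, hadj, hv2, hv3⟩⟩

-- generic: a fold of an "option-step" equals the fold of the action over the candidates
theorem pv_foldl_opt {σ τ ι : Type} (f : σ → ι → σ) (g : ι → Option τ) (h : σ → τ → σ)
    (hf : ∀ s i, f s i = (g i).elim s (h s)) :
    ∀ (l : List ι) (s : σ), l.foldl f s = (l.filterMap g).foldl h s := by
  intro l
  induction l with
  | nil => intro s; rfl
  | cons i l ih =>
    intro s
    simp only [List.foldl_cons, List.filterMap_cons, hf]
    cases g i <;> simp [ih]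

-- the queue-flavoured "add if unseen" action and its fold characterisation
def pvAddQ {α : Type} [BEq α] (p : PySem.Set α × List α) (y : α) :
    PySem.Set α × List α :=
  if PySem.Set.contains p.1 y then p else (PySem.Set.add p.1 y, p.2 ++ [y])

theorem pvAddQ_spec {α : Type} [BEq α] [LawfulBEq α] (l : List α) :
    ∀ (s acc : List α), s.Nodup →
      ∃ new : List α, l.foldl pvAddQ (s, acc) = (s ++ new, acc ++ new) ∧
        (s ++ new).Nodup ∧ (∀ y ∈ new, y ∈ l) ∧ (∀ y ∈ l, y ∈ s ∨ y ∈ new) := by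
  induction l with
  | nil => intro s acc hs; exact ⟨[], by simp, by simpa using hs, by simp, by simp⟩
  | cons y l ih =>
    intro s acc hs
    by_cases hy : y ∈ s
    · have h1 : pvAddQ (s, acc) y = (s, acc) := by
        simp [pvAddQ, PySem.Set.contains_iff, hy]
      obtain ⟨new, he, hn, hm, hc⟩ := ih s acc hs
      refine ⟨new, by simpa [h1] using he, hn, fun z hz => List.Mem.tail _ (hm z hz), ?_⟩
      intro z hz
      rcases List.mem_cons.mp hz with rfl | hz
      · exact Or.inl hy
      · exact hc z hz
    · have h1 : pvAddQ (s, acc) y = (s ++ [y], acc ++ [y]) := by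
        simp [pvAddQ, PySem.Set.contains_iff, hy, PySem.Set.add]
      have hdis : s.Disjoint [y] := fun a ha hb => hy ((List.mem_singleton.mp hb) ▸ ha)
      have hs' : (s ++ [y]).Nodup := hs.append (List.nodup_singleton y) hdis
      obtain ⟨new, he, hn, hm, hc⟩ := ih (s ++ [y]) (acc ++ [y]) hs'
      refine ⟨y :: new, ?_, ?_, ?_, ?_⟩
      · simpa [h1, List.append_assoc] using he
      · simpa [List.append_assoc] using hn
      · intro z hz
        rcases List.mem_cons.mp hz with rfl | hz
        · exact List.mem_cons_self ..
        · exact List.Mem.tail _ (hm z hz)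
      · intro z hz
        rcases List.mem_cons.mp hz with rfl | hz
        · exact Or.inr (List.mem_cons_self ..)
        · rcases hc z hz with h | h
          · rcases List.mem_append.mp h with h | h
            · exact Or.inl h
            · simp only [List.mem_singleton] at h
              exact Or.inr (h ▸ List.mem_cons_self ..)
          · exact Or.inr (List.mem_cons.mpr (Or.inr h))

-- the stack-flavoured action (pushes by cons) and its fold characterisation
def pvAddS {α : Type} [BEq α] (p : PySem.Set α × List α) (y : α) :
    PySem.Set α × List α :=
  if PySem.Set.contains p.1 y then p else (PySem.Set.add p.1 y, y :: p.2)

theorem pvAddS_spec {α : Type} [BEq α] [LawfulBEq α] (l : List α) :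
    ∀ (s acc : List α), s.Nodup →
      ∃ new : List α, (l.foldl pvAddS (s, acc)).1 = s ++ new ∧
        (∀ x, x ∈ (l.foldl pvAddS (s, acc)).2 ↔ x ∈ acc ∨ x ∈ new) ∧
        (l.foldl pvAddS (s, acc)).2.length = acc.length + new.length ∧
        (s ++ new).Nodup ∧ (∀ y ∈ new, y ∈ l) ∧ (∀ y ∈ l, y ∈ s ∨ y ∈ new) := by
  induction l with
  | nil =>
    intro s acc hs
    exact ⟨[], by simp, by simp, by simp, by simpa using hs, by simp, by simp⟩
  | cons y l ih =>
    intro s acc hs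
    by_cases hy : y ∈ s
    · have h1 : pvAddS (s, acc) y = (s, acc) := by
        simp [pvAddS, PySem.Set.contains_iff, hy]
      obtain ⟨new, he, hm2, hl2, hn, hm, hc⟩ := ih s acc hs
      rw [List.foldl_cons, h1]
      refine ⟨new, he, hm2, hl2, hn, fun z hz => List.Mem.tail _ (hm z hz), ?_⟩
      intro z hz
      rcases List.mem_cons.mp hz with rfl | hz
      · exact Or.inl hy
      · exact hc z hz
    · have h1 : pvAddS (s, acc) y = (s ++ [y], y :: acc) := by
        simp [pvAddS, PySem.Set.contains_iff, hy, PySem.Set.add]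
      have hdis : s.Disjoint [y] := fun a ha hb => hy ((List.mem_singleton.mp hb) ▸ ha)
      have hs' : (s ++ [y]).Nodup := hs.append (List.nodup_singleton y) hdis
      obtain ⟨new, he, hm2, hl2, hn, hm, hc⟩ := ih (s ++ [y]) (y :: acc) hs'
      rw [List.foldl_cons, h1]
      refine ⟨y :: new, ?_, ?_, ?_, ?_, ?_, ?_⟩
      · simpa [List.append_assoc] using he
      · intro x
        rw [hm2 x]
        simp only [List.mem_cons]
        tauto
      · rw [hl2]; simp; omega
      · simpa [List.append_assoc] using hn
      · intro z hz
        rcases List.mem_cons.mp hz with rfl | hz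
        · exact List.mem_cons_self ..
        · exact List.Mem.tail _ (hm z hz)
      · intro z hz
        rcases List.mem_cons.mp hz with rfl | hz
        · exact Or.inr (List.mem_cons_self ..)
        · rcases hc z hz with h | h
          · rcases List.mem_append.mp h with h | h
            · exact Or.inl h
            · simp only [List.mem_singleton] at h
              exact Or.inr (h ▸ List.mem_cons_self ..)
          · exact Or.inr (List.mem_cons.mpr (Or.inr h))

theorem pvAStep_eq {board : List (List Int)} {m x y bs : Int}
    (p : PySem.Set ((Int × Int) × Int) × List ((Int × Int) × Int)) (d : Int × Int) :
    pvAStep board m x y bs p d =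
      (pvCandA board m ((x, y), bs) d).elim p (pvAddQ p) := by
  unfold pvAStep pvCandA pvAddQ
  dsimp only
  rw [show (if pvVal board (x + d.1) (y + d.2) = -2 ∨
        pvVal board (x + d.1) (y + d.2) = 2 then (1 : Int) else 0) =
      pvCost board (x + d.1, y + d.2) from rfl]
  by_cases h1 : x + d.1 < 0 ∨ PySem.List.len board ≤ x + d.1 ∨ y + d.2 < 0 ∨
      pvRowLen board (x + d.1) ≤ y + d.2
  · rw [if_pos h1, if_pos h1, Option.elim_none]
  · rw [if_neg h1, if_neg h1]
    by_cases h2 : pvVal board (x + d.1) (y + d.2) = -1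
    · rw [if_pos h2, if_pos h2, Option.elim_none]
    · rw [if_neg h2, if_neg h2]
      by_cases h3 : m < bs + pvCost board (x + d.1, y + d.2)
      · rw [if_pos h3, if_pos h3, Option.elim_none]
      · rw [if_neg h3, if_neg h3, Option.elim_some]

theorem pvBStep_eq {board : List (List Int)} {x y : Int}
    (p : PySem.Set (Int × Int) × List (Int × Int)) (d : Int × Int) :
    pvBStep board x y p d = (pvCandZ board (x, y) d).elim p (pvAddS p) := by
  unfold pvBStep pvCandZ pvAddS
  dsimp only
  by_cases hb : 0 ≤ x + d.1 ∧ x + d.1 < PySem.List.len board ∧ 0 ≤ y + d.2 ∧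
      y + d.2 < pvRowLen board (x + d.1)
  · by_cases hv : pvVal board (x + d.1) (y + d.2) ≠ -1 ∧
        pvVal board (x + d.1) (y + d.2) ≠ -2 ∧ pvVal board (x + d.1) (y + d.2) ≠ 2
    · by_cases hc : PySem.Set.contains p.1 (x + d.1, y + d.2)
      · rw [if_pos hb, if_neg (fun h => h.2.2.2 hc), if_pos (And.intro hb hv),
          Option.elim_some, if_pos hc]
      · rw [if_pos hb, if_pos ⟨hv.1, hv.2.1, hv.2.2, hc⟩, if_pos (And.intro hb hv),
          Option.elim_some, if_neg hc]
    · rw [if_pos hb, if_neg (fun h => hv ⟨h.1, h.2.1, h.2.2.1⟩),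
        if_neg (fun (h : _ ∧ _) => hv h.2), Option.elim_none]
  · rw [if_neg hb, if_neg (fun (h : _ ∧ _) => hb h.1), Option.elim_none]

def pvCellSet (board : List (List Int)) : Finset (Int × Int) :=
  (Finset.range (board.length + 1) ×ˢ Finset.range (pvMaxRow board + 1)).image
    (fun p => ((p.1 : Int), (p.2 : Int)))

def pvStSet (board : List (List Int)) (m : Int) : Finset ((Int × Int) × Int) :=
  pvCellSet board ×ˢ (Finset.range (m.toNat + 1)).image (Nat.cast : Nat → Int)

theorem pv_row_le (bs : List (List Int)) : ∀ r ∈ bs, r.length ≤ pvMaxRow bs := by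
  induction bs with
  | nil => simp
  | cons b bs ih =>
    intro r hr
    rcases List.mem_cons.mp hr with rfl | hr
    · simp only [pvMaxRow, List.map_cons, List.foldr_cons]
      exact Nat.le_max_left _ _
    · have := ih r hr
      simp only [pvMaxRow, List.map_cons, List.foldr_cons]
      exact le_trans this (Nat.le_max_right _ _)

theorem pv_rowLen_le {board : List (List Int)} {x : Int}
    (h0 : 0 ≤ x) (h1 : x < (board.length : Int)) :
    pvRowLen board x ≤ (pvMaxRow board : Int) := by
  unfold pvRowLen
  rw [PySem.List.pyGetD_eq_getElem _ _ h0 h1, PySem.List.len_eq]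
  have : board[x.toNat]'(by omega) ∈ board := List.getElem_mem _
  exact_mod_cast pv_row_le board _ this

theorem pv_mem_cellSet {board : List (List Int)} {c : Int × Int} :
    c ∈ pvCellSet board ↔
      0 ≤ c.1 ∧ c.1 ≤ (board.length : Int) ∧ 0 ≤ c.2 ∧ c.2 ≤ (pvMaxRow board : Int) := by
  constructor
  · intro h
    simp only [pvCellSet, Finset.mem_image, Finset.mem_product, Finset.mem_range] at h
    obtain ⟨⟨a, b⟩, ⟨ha, hb⟩, h⟩ := h
    cases h; constructor <;> [omega; constructor <;> [omega; constructor <;> omega]]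
  · rintro ⟨h1, h2, h3, h4⟩
    simp only [pvCellSet, Finset.mem_image, Finset.mem_product, Finset.mem_range]
    exact ⟨(c.1.toNat, c.2.toNat), ⟨by omega, by omega⟩, by
      simp only []
      exact Prod.ext (by simp [Int.toNat_of_nonneg h1]) (by simp [Int.toNat_of_nonneg h3])⟩

theorem pv_adj_mem_cellSet {board : List (List Int)} {c c' : Int × Int}
    (h : pvAdjB board c c') : c' ∈ pvCellSet board := by
  obtain ⟨-, h1, h2, h3, h4, -⟩ := h
  have hr := pv_rowLen_le h1 (by simpa [PySem.List.len_eq] using h2)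
  rw [pv_mem_cellSet]
  refine ⟨h1, ?_, h3, by omega⟩
  simp only [PySem.List.len_eq] at h2; omega

theorem pv_mem_kset {m k : Int} :
    k ∈ (Finset.range (m.toNat + 1)).image (Nat.cast : Nat → Int) ↔
      0 ≤ k ∧ k ≤ (m.toNat : Int) := by
  simp only [Finset.mem_image, Finset.mem_range]
  constructor
  · rintro ⟨a, ha, rfl⟩; omega
  · rintro ⟨h0, h1⟩; exact ⟨k.toNat, by omega, by omega⟩

theorem pv_mem_stSet {board : List (List Int)} {m : Int} {st : (Int × Int) × Int} :
    st ∈ pvStSet board m ↔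
      st.1 ∈ pvCellSet board ∧ 0 ≤ st.2 ∧ st.2 ≤ (m.toNat : Int) := by
  simp only [pvStSet, Finset.mem_product, pv_mem_kset]

theorem pv_stSet_closed {board : List (List Int)} {m : Int} :
    ∀ st ∈ pvStSet board m, ∀ st' ∈ pvSuccsA board m st, st' ∈ pvStSet board m := by
  intro st hst st' hsucc
  rw [pv_mem_succsA] at hsucc
  obtain ⟨hadj, hk, hle⟩ := hsucc
  rw [pv_mem_stSet] at hst ⊢
  refine ⟨pv_adj_mem_cellSet hadj, ?_, ?_⟩
  · have hc := pvCost_nonneg board st'.1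
    have h2 := hst.2.1
    omega
  · have := Int.self_le_toNat m
    omega

theorem pv_cellSet_closed {board : List (List Int)} :
    ∀ c ∈ pvCellSet board, ∀ c' ∈ pvZSuccs board c, c' ∈ pvCellSet board := by
  intro c hc c' hsucc
  rw [pv_mem_zsuccs] at hsucc
  exact pv_adj_mem_cellSet hsucc.1

theorem pv_stSet_card {board : List (List Int)} {m : Int} :
    (pvStSet board m).card < pvAFuel board m := by
  have h1 : (pvCellSet board).card ≤ (board.length + 1) * (pvMaxRow board + 1) := by
    unfold pvCellSet
    exact le_trans Finset.card_image_le (le_of_eq (by simp))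
  have h2 : ((Finset.range (m.toNat + 1)).image (Nat.cast : Nat → Int)).card ≤
      m.toNat + 1 := le_trans Finset.card_image_le (le_of_eq (by simp))
  have h3 : (pvStSet board m).card =
      (pvCellSet board).card *
        ((Finset.range (m.toNat + 1)).image (Nat.cast : Nat → Int)).card := by
    unfold pvStSet
    exact Finset.card_product ..
  have h4 : (pvCellSet board).card *
        ((Finset.range (m.toNat + 1)).image (Nat.cast : Nat → Int)).card ≤
      (board.length + 2) * (pvMaxRow board + 2) * (m.toNat + 2) :=
    Nat.mul_le_mul (le_trans h1 (Nat.mul_le_mul (by omega) (by omega))) (by omega)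
  unfold pvAFuel
  omega

theorem pv_cellSet_card {board : List (List Int)} :
    (pvCellSet board).card < pvCellFuel board := by
  have h1 : (pvCellSet board).card ≤ (board.length + 1) * (pvMaxRow board + 1) := by
    unfold pvCellSet
    exact le_trans Finset.card_image_le (le_of_eq (by simp))
  have h2 : (board.length + 1) * (pvMaxRow board + 1) ≤
      (board.length + 2) * (pvMaxRow board + 2) :=
    Nat.mul_le_mul (by omega) (by omega)
  unfold pvCellFuel
  omega

theorem pv_nodup_le_card {α : Type} [DecidableEq α] {l : List α} {s : Finset α}
    (hn : l.Nodup) (hs : ∀ x ∈ l, x ∈ s) : l.length ≤ s.card := by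
  classical
  have : l.toFinset ⊆ s := fun x hx => hs x (List.mem_toFinset.mp hx)
  calc l.length = l.toFinset.card := (List.toFinset_card_of_nodup hn).symm
    _ ≤ s.card := Finset.card_le_card this

theorem pv_nodup_subset_length {α : Type} [DecidableEq α] {l1 l2 : List α}
    (h1 : l1.Nodup) (h2 : l2.Nodup) (hs : ∀ x ∈ l1, x ∈ l2) : l1.length ≤ l2.length := by
  calc l1.length = l1.toFinset.card := (List.toFinset_card_of_nodup h1).symm
    _ ≤ l2.toFinset.card := Finset.card_le_card (fun x hx =>
        List.mem_toFinset.mpr (hs x (List.mem_toFinset.mp hx)))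
    _ = l2.length := List.toFinset_card_of_nodup h2

-- main characterisation of A's BFS loop
theorem pvALoop_iff (board : List (List Int)) (m : Int)
    (S : Finset ((Int × Int) × Int))
    (hcl : ∀ st ∈ S, ∀ st' ∈ pvSuccsA board m st, st' ∈ S) :
    ∀ (f : Nat) (pending : List ((Int × Int) × Int)) (seen : PySem.Set ((Int × Int) × Int)),
      seen.Nodup → (∀ x ∈ seen, x ∈ S) → (∀ x ∈ pending, x ∈ seen) →
      (∀ x ∈ seen, x ∉ pending →
        ¬ (pvVal board x.1.1 x.1.2 = 1) ∧ ∀ y ∈ pvSuccsA board m x, y ∈ seen) →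
      pending.length + (S.card - seen.length) < f →
      (pvALoop board m f pending seen = true ↔
        ∃ st, pvReachFrom (pvSuccsA board m) seen st ∧ pvVal board st.1.1 st.1.2 = 1) := by
  intro f
  induction f with
  | zero =>
    intro pending seen _ _ _ _ hf
    omega
  | succ f ih =>
    intro pending seen hnd hseenS hpend hproc hf
    rcases pending with _ | ⟨⟨⟨x, y⟩, bs⟩, rest⟩
    · rw [show pvALoop board m (f + 1) [] seen = false from rfl]
      simp only [Bool.false_eq_true, false_iff]
      rintro ⟨st, hreach, hpred⟩
      have hclosed : ∀ z ∈ seen, ∀ w ∈ pvSuccsA board m z, w ∈ seen :=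
        fun z hz => (hproc z hz (by simp)).2
      have hst := pvReach_closed hclosed hreach
      exact (hproc st hst (by simp)).1 hpred
    · by_cases hpv : pvVal board x y = 1
      · rw [show pvALoop board m (f + 1) (((x, y), bs) :: rest) seen =
            (if pvVal board x y = 1 then true
             else
               let p := pvDirs.foldl (pvAStep board m x y bs) (seen, [])
               pvALoop board m f (rest ++ p.2) p.1) from rfl,
          if_pos hpv]
        simp only [true_iff]
        exact ⟨((x, y), bs), .base (hpend _ (by simp)), hpv⟩
      · have hhead : ((x, y), bs) ∈ seen := hpend _ (by simp)
        have hfold := pv_foldl_opt (pvAStep board m x y bs)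
          (pvCandA board m ((x, y), bs)) pvAddQ (fun s i => pvAStep_eq s i)
          pvDirs (seen, [])
        obtain ⟨new, heq, hnd', hnewmem, hcover⟩ :=
          pvAddQ_spec (pvSuccsA board m ((x, y), bs)) seen [] hnd
        rw [show pvALoop board m (f + 1) (((x, y), bs) :: rest) seen =
            (if pvVal board x y = 1 then true
             else
               let p := pvDirs.foldl (pvAStep board m x y bs) (seen, [])
               pvALoop board m f (rest ++ p.2) p.1) from rfl,
          if_neg hpv]
        have hp : pvDirs.foldl (pvAStep board m x y bs) (seen, []) =
            (seen ++ new, new) := by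
          rw [hfold]
          unfold pvSuccsA at heq
          simpa using heq
        rw [show (let p := pvDirs.foldl (pvAStep board m x y bs) (seen, [])
            pvALoop board m f (rest ++ p.2) p.1) =
            pvALoop board m f (rest ++ (pvDirs.foldl (pvAStep board m x y bs) (seen, [])).2)
              (pvDirs.foldl (pvAStep board m x y bs) (seen, [])).1 from rfl,
          hp]
        have hseenS' : ∀ z ∈ seen ++ new, z ∈ S := by
          intro z hz
          rcases List.mem_append.mp hz with hz | hz
          · exact hseenS z hz
          · exact hcl _ (hseenS _ hhead) _ (hnewmem z hz)
        have hpend' : ∀ z ∈ rest ++ new, z ∈ seen ++ new := by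
          intro z hz
          rcases List.mem_append.mp hz with hz | hz
          · exact List.mem_append.mpr (Or.inl (hpend _ (List.mem_cons.mpr (Or.inr hz))))
          · exact List.mem_append.mpr (Or.inr hz)
        have hproc' : ∀ z ∈ seen ++ new, z ∉ rest ++ new →
            ¬ (pvVal board z.1.1 z.1.2 = 1) ∧ ∀ w ∈ pvSuccsA board m z, w ∈ seen ++ new := by
          intro z hz hznp
          have hznew : z ∉ new := fun h => hznp (List.mem_append.mpr (Or.inr h))
          have hzrest : z ∉ rest := fun h => hznp (List.mem_append.mpr (Or.inl h))
          have hzseen : z ∈ seen := by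
            rcases List.mem_append.mp hz with h | h
            · exact h
            · exact absurd h hznew
          by_cases hzh : z = ((x, y), bs)
          · subst hzh
            exact ⟨hpv, fun w hw => List.mem_append.mpr (hcover w hw)⟩
          · have : z ∉ ((x, y), bs) :: rest := by
              intro h
              rcases List.mem_cons.mp h with h | h
              · exact hzh h
              · exact hzrest h
            obtain ⟨h1, h2⟩ := hproc z hzseen this
            exact ⟨h1, fun w hw => List.mem_append.mpr (Or.inl (h2 w hw))⟩
        have hlen : (seen ++ new).length ≤ S.card := pv_nodup_le_card hnd' hseenS'
        have hf' : (rest ++ new).length + (S.card - (seen ++ new).length) < f := by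
          simp only [List.length_append, List.length_cons] at *
          omega
        rw [ih (rest ++ new) (seen ++ new) hnd' hseenS' hpend' hproc' hf']
        have hto : ∀ z ∈ seen ++ new, pvReachFrom (pvSuccsA board m) seen z := by
          intro z hz
          rcases List.mem_append.mp hz with h | h
          · exact .base h
          · exact .step (.base hhead) (hnewmem z h)
        constructor
        · rintro ⟨st, hreach, hpred⟩
          exact ⟨st, pvReach_mono hto hreach, hpred⟩
        · rintro ⟨st, hreach, hpred⟩
          refine ⟨st, pvReach_mono (fun z hz => .base (List.mem_append.mpr (Or.inl hz))) hreach, hpred⟩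

-- main characterisation of close_free()
theorem pvBExpand_iff (board : List (List Int)) (S2 : Finset (Int × Int))
    (hcl : ∀ c ∈ S2, ∀ c' ∈ pvZSuccs board c, c' ∈ S2) :
    ∀ (f : Nat) (stack : List (Int × Int)) (visited : PySem.Set (Int × Int)),
      visited.Nodup → (∀ c ∈ visited, c ∈ S2) → (∀ c ∈ stack, c ∈ visited) →
      (∀ c ∈ visited, c ∉ stack → ∀ y ∈ pvZSuccs board c, y ∈ visited) →
      stack.length + (S2.card - visited.length) < f →
      (pvBExpand board f stack visited).Nodup ∧
        (∀ c ∈ pvBExpand board f stack visited, c ∈ S2) ∧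
        (∀ z, z ∈ pvBExpand board f stack visited ↔
          pvReachFrom (pvZSuccs board) visited z) := by
  intro f
  induction f with
  | zero =>
    intro stack visited _ _ _ _ hf
    omega
  | succ f ih =>
    intro stack visited hnd hvS hsv hproc hf
    rcases stack with _ | ⟨⟨x, y⟩, stack'⟩
    · rw [show pvBExpand board (f + 1) [] visited = visited from rfl]
      have hclosed : ∀ z ∈ visited, ∀ w ∈ pvZSuccs board z, w ∈ visited :=
        fun z hz => hproc z hz (by simp)
      exact ⟨hnd, hvS, fun z =>
        ⟨fun hz => .base hz, fun hz => pvReach_closed hclosed hz⟩⟩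
    · have hhead : (x, y) ∈ visited := hsv _ (by simp)
      have hfold := pv_foldl_opt (pvBStep board x y) (pvCandZ board (x, y)) pvAddS
        (fun s i => pvBStep_eq s i) pvDirs (visited, stack')
      obtain ⟨new, he1, hm2, hl2, hnd', hnewmem, hcover⟩ :=
        pvAddS_spec (pvZSuccs board (x, y)) visited stack' hnd
      unfold pvZSuccs at he1 hm2 hl2 hnewmem hcover
      rw [show pvBExpand board (f + 1) ((x, y) :: stack') visited =
          (let p := pvDirs.foldl (pvBStep board x y) (visited, stack')
           pvBExpand board f p.2 p.1) from rfl]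
      rw [show (let p := pvDirs.foldl (pvBStep board x y) (visited, stack')
          pvBExpand board f p.2 p.1) =
          pvBExpand board f (pvDirs.foldl (pvBStep board x y) (visited, stack')).2
            (pvDirs.foldl (pvBStep board x y) (visited, stack')).1 from rfl,
        hfold, he1]
      have hnewz : ∀ w ∈ new, w ∈ pvZSuccs board (x, y) := by
        intro w hw
        have := hnewmem w hw
        unfold pvZSuccs
        exact this
      have hvS' : ∀ z ∈ visited ++ new, z ∈ S2 := by
        intro z hz
        rcases List.mem_append.mp hz with hz | hz
        · exact hvS z hz
        · exact hcl _ (hvS _ hhead) _ (hnewz z hz)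
      set p2 := (List.foldl pvAddS (visited, stack') (List.filterMap (pvCandZ board (x, y)) pvDirs)).2 with hp2def
      have hsv' : ∀ z ∈ p2, z ∈ visited ++ new := by
        intro z hz
        rcases (hm2 z).mp hz with hz | hz
        · exact List.mem_append.mpr (Or.inl (hsv _ (List.mem_cons.mpr (Or.inr hz))))
        · exact List.mem_append.mpr (Or.inr hz)
      have hproc' : ∀ z ∈ visited ++ new, z ∉ p2 →
          ∀ w ∈ pvZSuccs board z, w ∈ visited ++ new := by
        intro z hz hznp
        have hznew : z ∉ new := fun h => hznp ((hm2 z).mpr (Or.inr h))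
        have hzst : z ∉ stack' := fun h => hznp ((hm2 z).mpr (Or.inl h))
        have hzv : z ∈ visited := by
          rcases List.mem_append.mp hz with h | h
          · exact h
          · exact absurd h hznew
        by_cases hzh : z = (x, y)
        · subst hzh
          intro w hw
          have hw' := hcover w (by unfold pvZSuccs at hw; exact hw)
          exact List.mem_append.mpr hw'
        · have : z ∉ (x, y) :: stack' := by
            intro h
            rcases List.mem_cons.mp h with h | h
            · exact hzh h
            · exact hzst h
          exact fun w hw => List.mem_append.mpr (Or.inl (hproc z hzv this w hw))
      have hlen : (visited ++ new).length ≤ S2.card := pv_nodup_le_card hnd' hvS'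
      have hf' : p2.length + (S2.card - (visited ++ new).length) < f := by
        rw [hl2]
        simp only [List.length_append, List.length_cons] at *
        omega
      obtain ⟨c1, c2, c3⟩ := ih p2 (visited ++ new) hnd' hvS' hsv' hproc' hf'
      have hto : ∀ z ∈ visited ++ new, pvReachFrom (pvZSuccs board) visited z := by
        intro z hz
        rcases List.mem_append.mp hz with h | h
        · exact .base h
        · exact .step (.base hhead) (hnewz z h)
      refine ⟨c1, c2, fun z => ?_⟩
      rw [c3 z]
      constructor
      · intro hreach
        exact pvReach_mono hto hreach
      · intro hreach
        exact pvReach_mono (fun w hw => .base (List.mem_append.mpr (Or.inl hw))) hreach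

theorem pv_mem_frontier {board : List (List Int)} {visited : PySem.Set (Int × Int)}
    {c' : Int × Int} :
    c' ∈ pvFrontier board visited ↔
      ∃ c ∈ visited, pvAdjB board c c' ∧
        (pvVal board c'.1 c'.2 = -2 ∨ pvVal board c'.1 c'.2 = 2) ∧ c' ∉ visited := by
  unfold pvFrontier
  simp only [List.mem_flatMap, List.mem_filterMap]
  constructor
  · rintro ⟨c, hcv, d, hd, heq⟩
    split_ifs at heq with h
    obtain ⟨hb1, hb2, hb3, hb4, hval, hnm⟩ := h
    injection heq with heq
    subst heq
    refine ⟨c, hcv, ⟨⟨d, hd, rfl⟩, hb1, by simpa [PySem.List.len_eq] using hb2, hb3, hb4, ?_⟩,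
      hval, fun hm => hnm ((PySem.Set.contains_iff _ _).mpr hm)⟩
    rcases hval with h | h <;> simp [h]
  · rintro ⟨c, hcv, hadj, hval, hnm⟩
    obtain ⟨⟨d, hd, hfst⟩, hb1, hb2, hb3, hb4, -⟩ := hadj
    subst hfst
    refine ⟨c, hcv, d, hd, ?_⟩
    rw [if_pos ⟨by simpa using hb1, by simpa [PySem.List.len_eq] using hb2,
      by simpa using hb3, by simpa using hb4, by simpa using hval,
      fun hc => hnm ((PySem.Set.contains_iff _ _).mp hc)⟩]

-- main characterisation of B's level loop: with `visited` exactly the cells of cost ≤ bridges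
-- and no cheaper target, B decides "minimum bridge count to a target ≤ max_bridge_steps"
theorem pvBOuter_iff (board : List (List Int)) (m : Int) (S2 : Finset (Int × Int))
    (hcl : ∀ c ∈ S2, ∀ c' ∈ pvZSuccs board c, c' ∈ S2)
    (hcell : ∀ c c' : Int × Int, pvAdjB board c c' → c' ∈ S2)
    (hS2f : S2.card < pvCellFuel board) :
    ∀ (f : Nat) (bridges : Int) (visited : PySem.Set (Int × Int)),
      0 ≤ bridges →
      visited.Nodup → (∀ c ∈ visited, c ∈ S2) →
      (∀ c ∈ visited, ∀ y ∈ pvZSuccs board c, y ∈ visited) →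
      (∀ c, c ∈ visited ↔ ∃ k, pvR board c k ∧ k ≤ bridges) →
      (∀ c k, pvR board c k → k < bridges → pvVal board c.1 c.2 ≠ 1) →
      S2.card - visited.length < f →
      (pvBOuter board m f bridges visited = true ↔
        ∃ c k, pvR board c k ∧ k ≤ m ∧ pvVal board c.1 c.2 = 1) := by
  intro f
  induction f with
  | zero =>
    intro bridges visited _ _ _ _ _ _ hf
    omega
  | succ f ih =>
    intro bridges visited hb0 hnd hvS hcf hinv h1cell hf
    rw [show pvBOuter board m (f + 1) bridges visited =
        (if visited.any (fun c => decide (pvVal board c.1 c.2 = 1)) then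
          decide (bridges ≤ m)
        else
          let frontier := pvFrontier board visited
          if frontier.isEmpty then false
          else
            pvBOuter board m f (bridges + 1)
              (pvBExpand board (frontier.length + pvCellFuel board) frontier.reverse
                (PySem.Set.update visited frontier))) from rfl]
    by_cases hfound : visited.any (fun c => decide (pvVal board c.1 c.2 = 1)) = true
    · rw [if_pos hfound]
      obtain ⟨c0, hc0v, hc0p⟩ := List.any_eq_true.mp hfound
      have hc0 : pvVal board c0.1 c0.2 = 1 := of_decide_eq_true hc0p
      obtain ⟨k0, hR0, hk0⟩ := (hinv c0).mp hc0v
      have hk0e : k0 = bridges := by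
        by_contra hne
        exact h1cell c0 k0 hR0 (by omega) hc0
      constructor
      · intro hdec
        have hbm := of_decide_eq_true hdec
        exact ⟨c0, k0, hR0, by omega, hc0⟩
      · rintro ⟨c, k, hR, hkm, hval⟩
        apply decide_eq_true
        by_contra hnle
        exact h1cell c k hR (by omega) hval
    · rw [if_neg hfound]
      have hnone : ∀ c ∈ visited, pvVal board c.1 c.2 ≠ 1 := by
        intro c hc hv
        exact hfound (List.any_eq_true.mpr ⟨c, hc, decide_eq_true hv⟩)
      have hstart : (1, 1) ∈ visited := (hinv (1, 1)).mpr ⟨0, pvR.base, hb0⟩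
      by_cases hemp : (pvFrontier board visited).isEmpty
      · rw [if_pos hemp]
        simp only [Bool.false_eq_true, false_iff]
        rintro ⟨c, k, hR, hkm, hval⟩
        have hclosedAll : ∀ a ∈ visited, ∀ a', pvAdjB board a a' → a' ∈ visited := by
          intro a ha a' hadj
          by_cases hbr : pvVal board a'.1 a'.2 = -2 ∨ pvVal board a'.1 a'.2 = 2
          · by_contra hnv
            have hmf : a' ∈ pvFrontier board visited :=
              pv_mem_frontier.mpr ⟨a, ha, hadj, hbr, hnv⟩
            rw [List.isEmpty_iff] at hemp
            rw [hemp] at hmf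
            exact absurd hmf (List.not_mem_nil)
          · push_neg at hbr
            exact hcf a ha a' (pv_mem_zsuccs.mpr ⟨hadj, hbr.1, hbr.2⟩)
        have hmem : ∀ a kk, pvR board a kk → a ∈ visited := by
          intro a kk hRa
          induction hRa with
          | base => exact hstart
          | step h hadj ih2 => exact hclosedAll _ ih2 _ hadj
        exact hnone c (hmem c k hR) hval
      · rw [if_neg hemp]
        obtain ⟨c0, hc0f⟩ : ∃ c0, c0 ∈ pvFrontier board visited := by
          by_contra hno
          push_neg at hno
          exact hemp (List.isEmpty_iff.mpr (List.eq_nil_iff_forall_not_mem.mpr hno))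
        obtain ⟨a0, ha0v, -, -, hc0nv⟩ := pv_mem_frontier.mp hc0f
        have hfrS : ∀ c ∈ pvFrontier board visited, c ∈ S2 := by
          intro c hc
          obtain ⟨a, -, hadj, -, -⟩ := pv_mem_frontier.mp hc
          exact hcell a c hadj
        have hnd1 : (PySem.Set.update visited (pvFrontier board visited)).Nodup :=
          PySem.Set.nodup_update _ _ hnd
        have hv1S : ∀ c ∈ PySem.Set.update visited (pvFrontier board visited), c ∈ S2 := by
          intro c hc
          rcases (PySem.Set.mem_update _ _ _).mp hc with h | h
          · exact hvS c h
          · exact hfrS c h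
        have hv1len : visited.length + 1 ≤
            (PySem.Set.update visited (pvFrontier board visited)).length := by
          rw [PySem.Set.update_eq_append_filter ..]
          rw [List.length_append]
          have hmemf : c0 ∈ (PySem.Set.ofList (pvFrontier board visited)).filter
              (fun y => !(PySem.Set.contains visited y)) := by
            refine List.mem_filter.mpr ⟨(PySem.Set.mem_ofList ..).mpr hc0f, ?_⟩
            simp only [Bool.not_eq_eq_eq_not, Bool.not_true]
            rw [show (PySem.Set.contains visited c0 = false) ↔
                ¬ (PySem.Set.contains visited c0 = true) by simp]
            intro hcont
            exact hc0nv ((PySem.Set.contains_iff _ _).mp hcont)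
          have := List.length_pos_of_mem hmemf
          omega
        obtain ⟨e1, e2, e3⟩ := pvBExpand_iff board S2 hcl
          ((pvFrontier board visited).length + pvCellFuel board)
          (pvFrontier board visited).reverse
          (PySem.Set.update visited (pvFrontier board visited))
          hnd1 hv1S
          (by
            intro c hc
            exact (PySem.Set.mem_update _ _ _).mpr (Or.inr (List.mem_reverse.mp hc)))
          (by
            intro c hc hcns y hy
            have hcv : c ∈ visited := by
              rcases (PySem.Set.mem_update _ _ _).mp hc with h | h
              · exact h
              · exact absurd (List.mem_reverse.mpr h) hcns
            exact (PySem.Set.mem_update _ _ _).mpr (Or.inl (hcf c hcv y hy)))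
          (by
            rw [List.length_reverse]
            omega)
        set V' := pvBExpand board ((pvFrontier board visited).length + pvCellFuel board)
          (pvFrontier board visited).reverse
          (PySem.Set.update visited (pvFrontier board visited)) with hV'
        have hinv' : ∀ c, c ∈ V' ↔ ∃ k, pvR board c k ∧ k ≤ bridges + 1 := by
          intro c
          rw [e3 c]
          constructor
          · intro hreach
            induction hreach with
            | base hx =>
              rcases (PySem.Set.mem_update _ _ _).mp hx with h | h
              · obtain ⟨k, hR, hk⟩ := (hinv _).mp h
                exact ⟨k, hR, by omega⟩
              · obtain ⟨a, ha, hadj, hbr, -⟩ := pv_mem_frontier.mp h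
                obtain ⟨k, hR, hk⟩ := (hinv a).mp ha
                exact ⟨k + 1, pvR_step_bridge hR hadj hbr, by omega⟩
            | step hr hsucc ih2 =>
              obtain ⟨k, hR, hk⟩ := ih2
              obtain ⟨hadj, hv2, hv3⟩ := pv_mem_zsuccs.mp hsucc
              exact ⟨k, pvR_step_free hR hadj hv2 hv3, hk⟩
          · rintro ⟨k, hR, hk⟩
            clear e3
            induction hR with
            | base =>
              exact .base ((PySem.Set.mem_update _ _ _).mpr (Or.inl hstart))
            | @step a ka a' hRa hadj ih2 =>
              have hca := pvCost_nonneg board a'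
              by_cases hbr : pvVal board a'.1 a'.2 = -2 ∨ pvVal board a'.1 a'.2 = 2
              · have hc1 : pvCost board a' = 1 := by
                  unfold pvCost
                  rw [if_pos hbr]
                rw [hc1] at hk
                have ha : a ∈ visited := (hinv a).mpr ⟨ka, hRa, by omega⟩
                by_cases hav : a' ∈ visited
                · exact .base ((PySem.Set.mem_update _ _ _).mpr (Or.inl hav))
                · exact .base ((PySem.Set.mem_update _ _ _).mpr
                    (Or.inr (pv_mem_frontier.mpr ⟨a, ha, hadj, hbr, hav⟩)))
              · push_neg at hbr
                have hc0' : pvCost board a' = 0 := by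
                  unfold pvCost
                  rw [if_neg]
                  rintro (h | h) <;> [exact hbr.1 h; exact hbr.2 h]
                rw [hc0'] at hk
                exact .step (ih2 (by omega)) (pv_mem_zsuccs.mpr ⟨hadj, hbr.1, hbr.2⟩)
        have hcf' : ∀ c ∈ V', ∀ y ∈ pvZSuccs board c, y ∈ V' := by
          intro c hc y hy
          exact (e3 y).mpr (.step ((e3 c).mp hc) hy)
        have h1cell' : ∀ c k, pvR board c k → k < bridges + 1 →
            pvVal board c.1 c.2 ≠ 1 := by
          intro c k hR hlt
          exact hnone c ((hinv c).mpr ⟨k, hR, by omega⟩)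
        have hVle : V'.length ≤ S2.card := pv_nodup_le_card e1 e2
        have hVge : (PySem.Set.update visited (pvFrontier board visited)).length ≤
            V'.length :=
          pv_nodup_subset_length hnd1 e1 (fun x hx => (e3 x).mpr (.base hx))
        exact ih (bridges + 1) V' (by omega) e1 e2 hcf' hinv' h1cell' (by omega)

-- A's capped state reachability vs the uncapped counting relation pvR
theorem pvR_to_reachA {board : List (List Int)} {m : Int} :
    ∀ {c : Int × Int} {k : Int}, pvR board c k → k ≤ m →
      pvReachFrom (pvSuccsA board m) [((1, 1), 0)] (c, k) := by
  intro c k h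
  induction h with
  | base => intro _; exact .base (by simp)
  | @step c k c' hR hadj ih =>
    intro hle
    have hck := pvCost_nonneg board c'
    have hkm : k ≤ m := by omega
    exact .step (ih hkm) (pv_mem_succsA.mpr ⟨hadj, rfl, hle⟩)

theorem pvReachA_iff {board : List (List Int)} {m : Int} {st : (Int × Int) × Int} :
    pvReachFrom (pvSuccsA board m) [((1, 1), 0)] st ↔
      st = ((1, 1), 0) ∨ (pvR board st.1 st.2 ∧ st.2 ≤ m) := by
  constructor
  · intro hz
    induction hz with
    | base hx =>
      left
      simpa using hx
    | @step x y hR hmem ih =>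
      rw [pv_mem_succsA] at hmem
      obtain ⟨hadj, hk, hle⟩ := hmem
      right
      refine ⟨?_, hle⟩
      rcases ih with rfl | ⟨hRx, -⟩
      · rw [hk]
        exact pvR.step pvR.base hadj
      · rw [hk]
        exact pvR.step hRx hadj
  · rintro (rfl | ⟨hR, hle⟩)
    · exact .base (by simp)
    · have := pvR_to_reachA hR hle
      simpa using this

-- zero-cost reachability from the start is exactly pvR with count 0
theorem pvR_to_reachZ {board : List (List Int)} :
    ∀ {c : Int × Int} {k : Int}, pvR board c k → k ≤ 0 →
      pvReachFrom (pvZSuccs board) [(1, 1)] c := by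
  intro c k h
  induction h with
  | base => intro _; exact .base (by simp)
  | @step c k c' hR hadj ih =>
    intro hle
    have hck := pvCost_nonneg board c'
    have hk0 := pvR_nonneg hR
    have hc0 : pvCost board c' = 0 := by omega
    have hvs : c' ∈ pvZSuccs board c := by
      rw [pv_mem_zsuccs]
      refine ⟨hadj, ?_, ?_⟩ <;>
        · intro hv
          simp only [pvCost, hv, true_or, or_true, if_pos] at hc0
          omega
    exact .step (ih (by omega)) hvs

theorem pvReachZ_iff {board : List (List Int)} {c : Int × Int} :
    pvReachFrom (pvZSuccs board) [(1, 1)] c ↔ pvR board c 0 := by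
  constructor
  · intro hz
    induction hz with
    | @base x hx =>
      have hx' : x = (1, 1) := by simpa using hx
      subst hx'
      exact pvR.base
    | @step x y hR hmem ih =>
      rw [pv_mem_zsuccs] at hmem
      obtain ⟨hadj, hv2, hv3⟩ := hmem
      have hc0 : pvCost board y = 0 := by
        unfold pvCost
        rw [if_neg]
        rintro (h | h) <;> [exact hv2 h; exact hv3 h]
      have := pvR.step ih hadj
      rwa [hc0, add_zero] at this
  · intro h
    exact pvR_to_reachZ h le_rfl

-- characterisations of the two top-level programs on Pre_
theorem pv_start_mem_cellSet {board : List (List Int)}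
    (hpre : 2 ≤ board.length ∧ 2 ≤ (board.getD 1 []).length) :
    ((1 : Int), (1 : Int)) ∈ pvCellSet board := by
  obtain ⟨h1, h2⟩ := hpre
  have hb1 : board.getD 1 [] = board[1]'(by omega) := List.getD_eq_getElem _ _ (by omega)
  have hmem : board[1]'(by omega) ∈ board := List.getElem_mem _
  have hrow : (board[1]'(by omega)).length ≤ pvMaxRow board := pv_row_le board _ hmem
  rw [hb1] at h2
  rw [pv_mem_cellSet]
  refine ⟨by omega, by exact_mod_cast by omega, by omega, by exact_mod_cast by omega⟩

theorem pvA_iff {board : List (List Int)} {m : Int}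
    (hpre : 2 ≤ board.length ∧ 2 ≤ (board.getD 1 []).length) :
    (blinking_bridge_reachable_with_few_bridges_py board m = true ↔
      pvVal board 1 1 = 1 ∨ ∃ c k, pvR board c k ∧ k ≤ m ∧ pvVal board c.1 c.2 = 1) := by
  have hofl : PySem.Set.ofList [((((1 : Int), (1 : Int))), (0 : Int))] = [((1, 1), 0)] := rfl
  have hst : (((1 : Int), (1 : Int)), (0 : Int)) ∈ pvStSet board m := by
    rw [pv_mem_stSet]
    exact ⟨pv_start_mem_cellSet hpre, by omega, by positivity⟩
  have hloop := pvALoop_iff board m (pvStSet board m) pv_stSet_closed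
    (pvAFuel board m) [((1, 1), 0)] [((1, 1), 0)]
    (by simp)
    (by intro x hx; rw [List.mem_singleton] at hx; subst hx; exact hst)
    (by intro x hx; exact hx)
    (by
      intro x hx hnx
      exact absurd hx hnx)
    (by
      have hcard := pv_stSet_card (board := board) (m := m)
      have h2f : 2 ≤ pvAFuel board m := by
        unfold pvAFuel
        omega
      simp only [List.length_cons, List.length_nil]
      omega)
  rw [show blinking_bridge_reachable_with_few_bridges_py board m =
      pvALoop board m (pvAFuel board m) [((1, 1), 0)]
        (PySem.Set.ofList [((1, 1), 0)]) from rfl, hofl, hloop]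
  constructor
  · rintro ⟨st, hreach, hval⟩
    rcases pvReachA_iff.mp hreach with rfl | ⟨hR, hle⟩
    · exact Or.inl hval
    · exact Or.inr ⟨st.1, st.2, hR, hle, hval⟩
  · rintro (hval | ⟨c, k, hR, hk, hval⟩)
    · exact ⟨((1, 1), 0), .base (List.mem_singleton.mpr rfl), hval⟩
    · exact ⟨(c, k), pvReachA_iff.mpr (Or.inr ⟨hR, hk⟩), hval⟩

theorem pvB_iff {board : List (List Int)} {m : Int}
    (hpre : 2 ≤ board.length ∧ 2 ≤ (board.getD 1 []).length) :
    (blinking_bridge_reachable_with_few_bridges_py_alt board m = true ↔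
      ∃ c k, pvR board c k ∧ k ≤ m ∧ pvVal board c.1 c.2 = 1) := by
  have hofl : PySem.Set.ofList [((1 : Int), (1 : Int))] = [(1, 1)] := rfl
  have hcc := pv_cellSet_card (board := board)
  obtain ⟨e1, e2, e3⟩ := pvBExpand_iff board (pvCellSet board) pv_cellSet_closed
    (1 + pvCellFuel board) [(1, 1)] [(1, 1)]
    (by simp)
    (by intro c hc; rw [List.mem_singleton] at hc; subst hc; exact pv_start_mem_cellSet hpre)
    (by intro c hc; exact hc)
    (by intro c hc hnc; exact absurd hc hnc)
    (by
      simp only [List.length_cons, List.length_nil]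
      omega)
  set V0 := pvBExpand board (1 + pvCellFuel board) [(1, 1)] [(1, 1)] with hV0
  have hinv0 : ∀ c, c ∈ V0 ↔ ∃ k, pvR board c k ∧ k ≤ (0 : Int) := by
    intro c
    rw [e3 c]
    constructor
    · intro h
      exact ⟨0, pvReachZ_iff.mp h, le_rfl⟩
    · rintro ⟨k, hR, hk⟩
      exact pvR_to_reachZ hR hk
  have houter := pvBOuter_iff board m (pvCellSet board) pv_cellSet_closed
    (fun c c' h => pv_adj_mem_cellSet h) hcc
    (pvCellFuel board) 0 V0 le_rfl e1 e2
    (fun c hc y hy => (e3 y).mpr (.step ((e3 c).mp hc) hy))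
    hinv0
    (by
      intro c k hR hlt
      have := pvR_nonneg hR
      omega)
    (by omega)
  rw [show blinking_bridge_reachable_with_few_bridges_py_alt board m =
      pvBOuter board m (pvCellFuel board) 0
        (pvBExpand board (1 + pvCellFuel board) [(1, 1)]
          (PySem.Set.ofList [(1, 1)])) from rfl, hofl]
  exact houter

theorem pvVal_start (board : List (List Int)) :
    pvVal board 1 1 = (board.getD 1 []).getD 1 0 := by
  unfold pvVal
  rw [PySem.List.pyGetD_ofNat', PySem.List.pyGetD_ofNat']

-- ===== VERDICT (by name: the statement is the Claim_ definition above) =====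
theorem blinking_bridge_reachable_with_few_bridges_py_spec :
    Claim_equal_blinking_bridge_reachable_with_few_bridges_py := by
  unfold Claim_equal_blinking_bridge_reachable_with_few_bridges_py
  intro board m _ hpre
  unfold Pre_blinking_bridge_reachable_with_few_bridges_py at hpre
  obtain ⟨h1, h2, hcor⟩ := hpre
  unfold Spec_blinking_bridge_reachable_with_few_bridges_py
  have hA := pvA_iff (m := m) ⟨h1, h2⟩
  have hB := pvB_iff (m := m) ⟨h1, h2⟩
  have hval := pvVal_start board
  apply Bool.eq_iff_iff.mpr
  rw [hA, hB]
  rcases hcor with hm | hv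
  · constructor
    · rintro (h1' | h)
      · exact ⟨(1, 1), 0, pvR.base, hm, h1'⟩
      · exact h
    · exact Or.inr
  · constructor
    · rintro (h1' | h)
      · rw [hval] at h1'
        exact absurd h1' hv
      · exact h
    · exact Or.inr
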